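-- pv_equiv track=rewrite | github.com/mxmlnrdr/clang_tidy_hook | hook/path_utils.py | match_absolute_pathes_based_on_relative_pathes
-- ===== SOURCE A (Python) =====
-- from typing import List
--
-- def match_absolute_pathes_based_on_relative_pathes(
--     absolute_pathes: List[str], relative_pathes: List[str]
-- ) -> List[str]:
--     matched_files = [
--         absolute
--         for absolute in absolute_pathes
--         if any(absolute.endswith(relative) for relative in relative_pathes)
--     ]
--     return matched_files
-- ===== SOURCE B (Python) =====
-- from typing import List
--
-- def _has_known_suffix(path, relative_set, suffix_lengths):
--     n = len(path)
--     for length in suffix_lengths: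
--         if length <= n and path[n - length:] in relative_set:
--             return True
--     return False
--
-- def match_absolute_pathes_based_on_relative_pathes(
--     absolute_pathes: List[str], relative_pathes: List[str]
-- ) -> List[str]:
--     relative_set = set(relative_pathes)
--     suffix_lengths = {len(relative) for relative in relative_pathes}
--     matched_files = []
--     for absolute in absolute_pathes:
--         if _has_known_suffix(absolute, relative_set, suffix_lengths):
--             matched_files.append(absolute)
--     return matched_files
-- ===== Notes on version B (the rewrite author's own statement) =====
-- stated objective: faster
-- what changed: Instead of calling endswith for every (absolute, relative) pair, B hashes the relatives into a set once and, per absolute path, tests only one suffix slice per distinct relative length against the set.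
import Mathlib
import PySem

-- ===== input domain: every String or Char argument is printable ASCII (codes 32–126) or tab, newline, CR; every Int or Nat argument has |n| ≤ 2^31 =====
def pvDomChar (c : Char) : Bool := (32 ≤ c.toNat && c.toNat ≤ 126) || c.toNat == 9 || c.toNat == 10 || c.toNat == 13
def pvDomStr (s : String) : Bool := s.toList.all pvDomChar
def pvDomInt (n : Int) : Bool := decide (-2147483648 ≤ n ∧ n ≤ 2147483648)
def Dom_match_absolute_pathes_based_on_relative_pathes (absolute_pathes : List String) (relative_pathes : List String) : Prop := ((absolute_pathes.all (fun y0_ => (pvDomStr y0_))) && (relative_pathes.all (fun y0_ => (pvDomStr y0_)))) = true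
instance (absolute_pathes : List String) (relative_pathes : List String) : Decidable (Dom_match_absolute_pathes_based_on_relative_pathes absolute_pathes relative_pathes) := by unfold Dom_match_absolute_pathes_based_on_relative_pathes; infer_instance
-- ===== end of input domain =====

-- B replaces the per-pair endswith scan by one hashed set of the relatives plus the set of
-- their distinct lengths, testing a single suffix slice per distinct length (objective: faster).

-- ===== PORT A =====
def match_absolute_pathes_based_on_relative_pathes (absolute_pathes : List String) (relative_pathes : List String) : List String :=
  absolute_pathes.filter (fun absolute =>
    relative_pathes.any (fun relative => PySem.Str.endswith absolute relative))

-- ===== PORT B =====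
-- helper _has_known_suffix: the for/early-return-True loop is List.any over the length set
def hasKnownSuffix (path : String) (relative_set : PySem.Set String) (suffix_lengths : PySem.Set Int) : Bool :=
  let n := PySem.Str.len path
  suffix_lengths.any (fun length =>
    decide (length ≤ n) &&
    PySem.Set.contains relative_set (PySem.Str.slice path (some (n - length)) none))

def match_absolute_pathes_based_on_relative_pathes_alt (absolute_pathes : List String) (relative_pathes : List String) : List String :=
  let relative_set : PySem.Set String := PySem.Set.ofList relative_pathes
  let suffix_lengths : PySem.Set Int :=
    PySem.Set.ofList (relative_pathes.map (fun relative => PySem.Str.len relative))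
  absolute_pathes.foldl
    (fun matched_files absolute =>
      if hasKnownSuffix absolute relative_set suffix_lengths then matched_files ++ [absolute]
      else matched_files) []

-- ===== PRECONDITION & SPEC =====
def Spec_match_absolute_pathes_based_on_relative_pathes (absolute_pathes : List String) (relative_pathes : List String) (out : List String) : Prop := out = match_absolute_pathes_based_on_relative_pathes_alt absolute_pathes relative_pathes
instance (absolute_pathes : List String) (relative_pathes : List String) (out : List String) : Decidable (Spec_match_absolute_pathes_based_on_relative_pathes absolute_pathes relative_pathes out) := by unfold Spec_match_absolute_pathes_based_on_relative_pathes; infer_instance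

-- ===== CLAIM (what is proved, stated in full; the proofs are below) =====
def Claim_equal_match_absolute_pathes_based_on_relative_pathes : Prop := ∀ (absolute_pathes : List String) (relative_pathes : List String), Dom_match_absolute_pathes_based_on_relative_pathes absolute_pathes relative_pathes → Spec_match_absolute_pathes_based_on_relative_pathes absolute_pathes relative_pathes (match_absolute_pathes_based_on_relative_pathes absolute_pathes relative_pathes)

-- ===== LEMMAS AND PROOFS =====

-- the two filter predicates agree on every string
lemma pred_eq (relative_pathes : List String) (a : String) :
    relative_pathes.any (fun relative => PySem.Str.endswith a relative) =
    hasKnownSuffix a (PySem.Set.ofList relative_pathes)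
      (PySem.Set.ofList (relative_pathes.map (fun relative => PySem.Str.len relative))) := by
  unfold hasKnownSuffix
  rw [Bool.eq_iff_iff]
  simp only [List.any_eq_true, Bool.and_eq_true, decide_eq_true_eq,
    PySem.Set.mem_ofList, List.mem_map, PySem.Set.contains_iff]
  constructor
  · rintro ⟨r, hr, hend⟩
    have hsuf : r.toList <:+ a.toList := by
      simpa [PySem.Chars.endswith_iff] using hend
    obtain ⟨t, ht⟩ := hsuf
    have hlen : r.toList.length ≤ a.toList.length := by
      rw [← ht]; simp
    refine ⟨PySem.Str.len r, ⟨r, hr, rfl⟩, ?_, ?_⟩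
    · simp only [PySem.Str.len_eq]
      exact_mod_cast hlen
    · have hcast : PySem.Str.len a - PySem.Str.len r =
          ((a.toList.length - r.toList.length : Nat) : Int) := by
        simp only [PySem.Str.len_eq]
        omega
      have hdrop : a.toList.drop (a.toList.length - r.toList.length) = r.toList := by
        rw [← ht]
        simp
      have : (PySem.Str.slice a (some (PySem.Str.len a - PySem.Str.len r)) none).toList
          = r.toList := by
        rw [hcast]
        simpa [PySem.List.slice_from_natCast] using hdrop
      rwa [String.toList_inj.mp this]
  · rintro ⟨L, ⟨r0, hr0, rfl⟩, hle, hmem⟩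
    refine ⟨_, hmem, ?_⟩
    have hcast : PySem.Str.len a - PySem.Str.len r0 =
        ((a.toList.length - r0.toList.length : Nat) : Int) := by
      simp only [PySem.Str.len_eq] at hle ⊢
      omega
    have htl : (PySem.Str.slice a (some (PySem.Str.len a - PySem.Str.len r0)) none).toList
        = a.toList.drop (a.toList.length - r0.toList.length) := by
      rw [hcast]; simp [PySem.List.slice_from_natCast]
    simp only [PySem.Str.endswith_eq]
    rw [PySem.Chars.endswith_iff, htl]
    exact List.drop_suffix _ _

-- ===== VERDICT (by name: the statement is the Claim_ definition above) =====
theorem match_absolute_pathes_based_on_relative_pathes_spec : Claim_equal_match_absolute_pathes_based_on_relative_pathes := by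
  intro abs rel _
  unfold Spec_match_absolute_pathes_based_on_relative_pathes
  unfold match_absolute_pathes_based_on_relative_pathes match_absolute_pathes_based_on_relative_pathes_alt
  rw [PySem.List.foldl_append_if_eq_filter]
  rw [List.nil_append]
  apply List.filter_congr
  intro a _
  exact pred_eq rel a
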